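-- pv_equiv track=rewrite | github.com/turnbow59/trajectory-safety | pipeline_monitor.py | _categorize_anomalies
-- ===== SOURCE A (Python) =====
-- def _categorize_anomalies(anomalies: list[str]) -> dict:
--     cats = {"slowdown": 0, "nan": 0, "reward_hack": 0, "kl_explode": 0, "grad_norm": 0}
--     for a in anomalies:
--         a_lower = a.lower()
--         if "throughput" in a_lower: cats["slowdown"] += 1
--         elif "non-finite" in a_lower: cats["nan"] += 1
--         elif "reward hacking" in a_lower: cats["reward_hack"] += 1
--         elif "kl" in a_lower: cats["kl_explode"] += 1
--         elif "gradient" in a_lower: cats["grad_norm"] += 1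
--     return cats
-- ===== SOURCE B (Python) =====
-- def _categorize_anomalies(anomalies: list[str]) -> dict:
--     lows = [a.lower() for a in anomalies]
--
--     def count(kw, higher):
--         # number of anomalies containing kw but none of the higher-priority keywords
--         return sum(1 for s in lows if kw in s and not any(h in s for h in higher))
--
--     kws = ["throughput", "non-finite", "reward hacking", "kl", "gradient"]
--     names = ["slowdown", "nan", "reward_hack", "kl_explode", "grad_norm"]
--     return {name: count(kw, kws[:i]) for i, (kw, name) in enumerate(zip(kws, names))}
-- ===== Notes on version B (the rewrite author's own statement) =====
-- stated objective: alternative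
-- what changed: Instead of one pass with a first-match branch chain mutating counters, B lowercases once and computes each category independently as a count over the whole list (keyword present and no higher-priority keyword present), i.e. five declarative filtered counts instead of a stateful dispatch loop.
import Mathlib
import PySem

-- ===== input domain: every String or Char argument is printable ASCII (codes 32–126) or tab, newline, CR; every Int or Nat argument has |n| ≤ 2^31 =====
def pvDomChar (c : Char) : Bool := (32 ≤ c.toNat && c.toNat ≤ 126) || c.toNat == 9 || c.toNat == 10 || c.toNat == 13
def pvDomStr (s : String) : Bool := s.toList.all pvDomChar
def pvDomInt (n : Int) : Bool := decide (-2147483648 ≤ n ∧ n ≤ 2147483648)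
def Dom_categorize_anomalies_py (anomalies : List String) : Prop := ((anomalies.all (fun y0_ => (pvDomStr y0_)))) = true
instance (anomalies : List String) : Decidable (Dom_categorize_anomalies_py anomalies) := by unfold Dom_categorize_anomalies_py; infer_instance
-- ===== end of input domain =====

-- B replaces A's single stateful first-match branch-chain pass by five independent
-- declarative filtered counts (keyword present, no higher-priority keyword present); alternative decomposition, same cost.


-- ===== PORT A =====
-- literal transliteration of the if/elif chain mutating the dict cats
def categorize_anomalies_py (anomalies : List String) : List (String × Int) :=
  let cats : PySem.Dict String Int :=
    ((((PySem.Dict.empty.insert "slowdown" 0).insert "nan" 0).insert "reward_hack" 0).insert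
        "kl_explode" 0).insert "grad_norm" 0
  let cats := anomalies.foldl (fun cats a =>
    let a_lower := PySem.Str.lower a
    if PySem.Str.isIn "throughput" a_lower then cats.modify "slowdown" 0 (· + 1)
    else if PySem.Str.isIn "non-finite" a_lower then cats.modify "nan" 0 (· + 1)
    else if PySem.Str.isIn "reward hacking" a_lower then cats.modify "reward_hack" 0 (· + 1)
    else if PySem.Str.isIn "kl" a_lower then cats.modify "kl_explode" 0 (· + 1)
    else if PySem.Str.isIn "gradient" a_lower then cats.modify "grad_norm" 0 (· + 1)
    else cats) cats
  cats.items

-- ===== PORT B =====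
-- Source B: lowercase once, then one independent filtered count per category
-- (the dict comprehension has the five distinct literal keys, so its items are this map)
def categorize_anomalies_py_alt (anomalies : List String) : List (String × Int) :=
  let lows := anomalies.map PySem.Str.lower
  let count := fun (kw : String) (higher : List String) =>
    ((lows.countP (fun s => PySem.Str.isIn kw s && !(higher.any (fun h => PySem.Str.isIn h s)))) : Int)
  let kws : List String := ["throughput", "non-finite", "reward hacking", "kl", "gradient"]
  let names : List String := ["slowdown", "nan", "reward_hack", "kl_explode", "grad_norm"]
  (PySem.List.enumerate (kws.zip names)).map
    (fun p => (p.2.2, count p.2.1 (kws.take p.1.toNat)))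

-- ===== PRECONDITION & SPEC =====
def Spec_categorize_anomalies_py (anomalies : List String) (out : List (String × Int)) : Prop := out = categorize_anomalies_py_alt anomalies
instance (anomalies : List String) (out : List (String × Int)) : Decidable (Spec_categorize_anomalies_py anomalies out) := by unfold Spec_categorize_anomalies_py; infer_instance

-- ===== CLAIM (what is proved, stated in full; the proofs are below) =====
def Claim_equal_categorize_anomalies_py : Prop := ∀ (anomalies : List String), Dom_categorize_anomalies_py anomalies → Spec_categorize_anomalies_py anomalies (categorize_anomalies_py anomalies)

-- ===== LEMMAS AND PROOFS =====

-- A's loop body and the dict with the five fixed keys, as proof helpers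
def pvStep (cats : PySem.Dict String Int) (a : String) : PySem.Dict String Int :=
  let a_lower := PySem.Str.lower a
  if PySem.Str.isIn "throughput" a_lower then cats.modify "slowdown" 0 (· + 1)
  else if PySem.Str.isIn "non-finite" a_lower then cats.modify "nan" 0 (· + 1)
  else if PySem.Str.isIn "reward hacking" a_lower then cats.modify "reward_hack" 0 (· + 1)
  else if PySem.Str.isIn "kl" a_lower then cats.modify "kl_explode" 0 (· + 1)
  else if PySem.Str.isIn "gradient" a_lower then cats.modify "grad_norm" 0 (· + 1)
  else cats

def pvMk (c1 c2 c3 c4 c5 : Int) : PySem.Dict String Int :=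
  ((((PySem.Dict.empty.insert "slowdown" c1).insert "nan" c2).insert "reward_hack" c3).insert
      "kl_explode" c4).insert "grad_norm" c5

-- B's five predicates
def pvP1 (s : String) : Bool := PySem.Str.isIn "throughput" s && !([] : List String).any (fun h => PySem.Str.isIn h s)
def pvP2 (s : String) : Bool := PySem.Str.isIn "non-finite" s && !(["throughput"].any (fun h => PySem.Str.isIn h s))
def pvP3 (s : String) : Bool := PySem.Str.isIn "reward hacking" s && !(["throughput", "non-finite"].any (fun h => PySem.Str.isIn h s))
def pvP4 (s : String) : Bool := PySem.Str.isIn "kl" s && !(["throughput", "non-finite", "reward hacking"].any (fun h => PySem.Str.isIn h s))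
def pvP5 (s : String) : Bool := PySem.Str.isIn "gradient" s && !(["throughput", "non-finite", "reward hacking", "kl"].any (fun h => PySem.Str.isIn h s))

-- modify on the five-key dict, one lemma per key
theorem pv_modify1 (c1 c2 c3 c4 c5 : Int) : (pvMk c1 c2 c3 c4 c5).modify "slowdown" 0 (· + 1) = pvMk (c1 + 1) c2 c3 c4 c5 := rfl
theorem pv_modify2 (c1 c2 c3 c4 c5 : Int) : (pvMk c1 c2 c3 c4 c5).modify "nan" 0 (· + 1) = pvMk c1 (c2 + 1) c3 c4 c5 := rfl
theorem pv_modify3 (c1 c2 c3 c4 c5 : Int) : (pvMk c1 c2 c3 c4 c5).modify "reward_hack" 0 (· + 1) = pvMk c1 c2 (c3 + 1) c4 c5 := rfl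
theorem pv_modify4 (c1 c2 c3 c4 c5 : Int) : (pvMk c1 c2 c3 c4 c5).modify "kl_explode" 0 (· + 1) = pvMk c1 c2 c3 (c4 + 1) c5 := rfl
theorem pv_modify5 (c1 c2 c3 c4 c5 : Int) : (pvMk c1 c2 c3 c4 c5).modify "grad_norm" 0 (· + 1) = pvMk c1 c2 c3 c4 (c5 + 1) := rfl

-- A's branch chain at one element equals the five independent B-predicate increments
theorem pv_step_mk (c1 c2 c3 c4 c5 : Int) (a : String) :
    pvStep (pvMk c1 c2 c3 c4 c5) a =
      pvMk (c1 + if pvP1 (PySem.Str.lower a) then 1 else 0)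
           (c2 + if pvP2 (PySem.Str.lower a) then 1 else 0)
           (c3 + if pvP3 (PySem.Str.lower a) then 1 else 0)
           (c4 + if pvP4 (PySem.Str.lower a) then 1 else 0)
           (c5 + if pvP5 (PySem.Str.lower a) then 1 else 0) := by
  simp only [pvStep, pvP1, pvP2, pvP3, pvP4, pvP5, List.any_cons, List.any_nil]
  by_cases h1 : PySem.Str.isIn "throughput" (PySem.Str.lower a) = true <;>
    by_cases h2 : PySem.Str.isIn "non-finite" (PySem.Str.lower a) = true <;>
      by_cases h3 : PySem.Str.isIn "reward hacking" (PySem.Str.lower a) = true <;>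
        by_cases h4 : PySem.Str.isIn "kl" (PySem.Str.lower a) = true <;>
          by_cases h5 : PySem.Str.isIn "gradient" (PySem.Str.lower a) = true <;>
            simp only [h1, h2, h3, h4, h5, Bool.not_eq_true] at * <;>
              simp [pv_modify1, pv_modify2, pv_modify3, pv_modify4, pv_modify5]

theorem pv_cast_aux (c : Int) (b : Bool) (n : Nat) :
    c + (if b then (1 : Int) else 0) + (n : Int) = c + ((n + if b then 1 else 0 : Nat) : Int) := by
  cases b <;> push_cast <;> ring

theorem pv_fold_mk (anomalies : List String) :
    ∀ (c1 c2 c3 c4 c5 : Int),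
    (anomalies.foldl pvStep (pvMk c1 c2 c3 c4 c5)).items =
      [("slowdown", c1 + ((anomalies.map PySem.Str.lower).countP pvP1 : Int)),
       ("nan", c2 + ((anomalies.map PySem.Str.lower).countP pvP2 : Int)),
       ("reward_hack", c3 + ((anomalies.map PySem.Str.lower).countP pvP3 : Int)),
       ("kl_explode", c4 + ((anomalies.map PySem.Str.lower).countP pvP4 : Int)),
       ("grad_norm", c5 + ((anomalies.map PySem.Str.lower).countP pvP5 : Int))] := by
  induction anomalies with
  | nil => intro c1 c2 c3 c4 c5; simp [pvMk, PySem.Dict.insert, PySem.Dict.empty]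
  | cons a as ih =>
      intro c1 c2 c3 c4 c5
      simp only [List.foldl_cons, pv_step_mk, ih, List.map_cons, List.countP_cons, pv_cast_aux]

-- B reduces to the five counts over the lowercased list
theorem pv_alt_eq (anomalies : List String) :
    categorize_anomalies_py_alt anomalies =
      [("slowdown", ((anomalies.map PySem.Str.lower).countP pvP1 : Int)),
       ("nan", ((anomalies.map PySem.Str.lower).countP pvP2 : Int)),
       ("reward_hack", ((anomalies.map PySem.Str.lower).countP pvP3 : Int)),
       ("kl_explode", ((anomalies.map PySem.Str.lower).countP pvP4 : Int)),
       ("grad_norm", ((anomalies.map PySem.Str.lower).countP pvP5 : Int))] := rfl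

-- ===== VERDICT (by name: the statement is the Claim_ definition above) =====
theorem categorize_anomalies_py_spec : Claim_equal_categorize_anomalies_py := by
  intro anomalies _
  unfold Spec_categorize_anomalies_py categorize_anomalies_py
  rw [pv_alt_eq]
  show (anomalies.foldl pvStep (pvMk 0 0 0 0 0)).items = _
  rw [pv_fold_mk]
  simp
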